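-- pv_equiv track=rewrite | github.com/NIKHIL867-M/SRIJAN | correalator/c.py | group_type
-- ===== SOURCE A (Python) =====
-- def group_type(evts):
--     t  = {e["record_type"] for e in evts}
--     hp = "process_start"    in t
--     hn = "network_connect"  in t
--     hs = "script_execution" in t
--     if hp and hn and hs: return "full_activity_session"
--     if hp and hn:        return "process_with_network"
--     if hp and hs:        return "process_with_script"
--     if hn and hs:        return "network_with_script"
--     if hp:               return "process_session"
--     if hn:               return "network_flow"
--     if hs:               return "script_session"
--     return "mixed"
-- ===== SOURCE B (Python) =====
-- _LABELS = [
--     "mixed",                  # 0b000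
--     "process_session",        # 0b001 hp
--     "network_flow",           # 0b010 hn
--     "process_with_network",   # 0b011
--     "script_session",         # 0b100 hs
--     "process_with_script",    # 0b101
--     "network_with_script",    # 0b110
--     "full_activity_session",  # 0b111
-- ]
--
-- _TARGETS = ("process_start", "network_connect", "script_execution")
--
-- def group_type(evts):
--     mask = 0
--     for i, name in enumerate(_TARGETS):
--         if any(e["record_type"] == name for e in evts):
--             mask += 2 ** i
--     return _LABELS[mask]
-- ===== Notes on version B (the rewrite author's own statement) =====
-- stated objective: alternative
-- what changed: B inverts the traversal: instead of one pass over events building a set of types and a 7-branch if-cascade, it scans the event list once per target type (any per target), accumulates an integer bitmask, and indexes a fixed list of eight labels; no set and no boolean branching remain.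
-- outside the precondition, e.g. on group_type([{'record_type': 'process_start'}, {}]): A raises KeyError, B raises KeyError
import Mathlib
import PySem

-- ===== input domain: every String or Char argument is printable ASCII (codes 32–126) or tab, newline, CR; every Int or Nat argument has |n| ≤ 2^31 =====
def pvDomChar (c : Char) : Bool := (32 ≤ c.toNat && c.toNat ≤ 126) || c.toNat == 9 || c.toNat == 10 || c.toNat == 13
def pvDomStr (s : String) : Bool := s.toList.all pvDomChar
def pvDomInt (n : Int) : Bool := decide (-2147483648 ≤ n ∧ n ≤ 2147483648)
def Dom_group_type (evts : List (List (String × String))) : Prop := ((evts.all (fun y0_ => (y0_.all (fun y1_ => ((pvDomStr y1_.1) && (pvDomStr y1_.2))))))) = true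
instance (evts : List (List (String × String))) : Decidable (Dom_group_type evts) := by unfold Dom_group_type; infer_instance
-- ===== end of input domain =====

-- B inverts the traversal: one scan of the events per target type accumulating an
-- integer bitmask, indexing a fixed list of eight labels (objective: alternative).

-- ===== PORT A =====
-- set comprehension {e["record_type"] for e in evts}; under Pre_ every lookup hits,
-- so the .getD "" default is never taken
def group_type (evts : List (List (String × String))) : String :=
  let t : PySem.Set String :=
    evts.foldl (fun s e => PySem.Set.add s ((List.lookup "record_type" e).getD "")) PySem.Set.empty
  let hp := PySem.Set.contains t "process_start"
  let hn := PySem.Set.contains t "network_connect"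
  let hs := PySem.Set.contains t "script_execution"
  if hp && hn && hs then "full_activity_session"
  else if hp && hn then "process_with_network"
  else if hp && hs then "process_with_script"
  else if hn && hs then "network_with_script"
  else if hp then "process_session"
  else if hn then "network_flow"
  else if hs then "script_session"
  else "mixed"

-- ===== PORT B =====
-- module-level constants _LABELS and _TARGETS of Source B
def pvLabels : List String :=
  ["mixed", "process_session", "network_flow", "process_with_network",
   "script_session", "process_with_script", "network_with_script", "full_activity_session"]

def pvTargets : List String := ["process_start", "network_connect", "script_execution"]

-- mask in 0..7, so the pyGet? is always some; under Pre_ every lookup hits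
def group_type_alt (evts : List (List (String × String))) : String :=
  let mask : Int :=
    (PySem.List.enumerate pvTargets).foldl
      (fun m p =>
        if evts.any (fun e => ((List.lookup "record_type" e).getD "") == p.2)
        then m + 2 ^ p.1.toNat else m)  -- enumerate indices are 0,1,2 (≥ 0), so .toNat is exact
      0
  (PySem.List.pyGet? pvLabels mask).getD ""

-- ===== PRECONDITION & SPEC =====
-- Pre_ excludes inputs containing an event without a "record_type" key, on which A raises KeyError.
def Pre_group_type (evts : List (List (String × String))) : Prop :=
  (evts.all (fun e => e.any (fun p => p.1 == "record_type"))) = true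
instance (evts : List (List (String × String))) : Decidable (Pre_group_type evts) := by
  unfold Pre_group_type; infer_instance

def pvWitness_group_type : (List (List (String × String))) :=
  [[("record_type", "process_start")], [("record_type", "other")]]

def Spec_group_type (evts : List (List (String × String))) (out : String) : Prop := out = group_type_alt evts
instance (evts : List (List (String × String))) (out : String) : Decidable (Spec_group_type evts out) := by unfold Spec_group_type; infer_instance

-- ===== CLAIM (what is proved, stated in full; the proofs are below) =====
def Claim_equal_group_type : Prop := ∀ (evts : List (List (String × String))), Dom_group_type evts → Pre_group_type evts → Spec_group_type evts (group_type evts)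

-- ===== LEMMAS AND PROOFS =====

-- A's set build: membership in the folded set = membership in the seed or some event has that record type
lemma mem_buildSet (evts : List (List (String × String))) (s : PySem.Set String) (x : String) :
    x ∈ evts.foldl (fun s e => PySem.Set.add s ((List.lookup "record_type" e).getD "")) s ↔
      x ∈ s ∨ (evts.any (fun e => ((List.lookup "record_type" e).getD "") == x)) = true := by
  induction evts generalizing s with
  | nil => simp
  | cons e rest ih =>
      simp only [List.foldl_cons, List.any_cons, ih, PySem.Set.mem_add, Bool.or_eq_true, beq_iff_eq]
      tauto

lemma contains_buildSet (evts : List (List (String × String))) (x : String) :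
    PySem.Set.contains
        (evts.foldl (fun s e => PySem.Set.add s ((List.lookup "record_type" e).getD "")) PySem.Set.empty) x =
      evts.any (fun e => ((List.lookup "record_type" e).getD "") == x) := by
  rw [Bool.eq_iff_iff, PySem.Set.contains_iff, mem_buildSet]
  simp [PySem.Set.empty]

-- ===== VERDICT (by name: the statement is the Claim_ definition above) =====
theorem group_type_spec : Claim_equal_group_type := by
  intro evts _ _
  unfold Spec_group_type group_type group_type_alt
  simp only [contains_buildSet, pvTargets, PySem.List.enumerate_cons, PySem.List.enumerate_nil,
    List.foldl_cons, List.foldl_nil]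
  cases evts.any (fun e => ((List.lookup "record_type" e).getD "") == "process_start") <;>
    cases evts.any (fun e => ((List.lookup "record_type" e).getD "") == "network_connect") <;>
      cases evts.any (fun e => ((List.lookup "record_type" e).getD "") == "script_execution") <;>
        rfl
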